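-- pv_equiv track=rewrite | github.com/Aranchev/pytest_fundamental | src/_05_list_adv/mex/_02_take_skip_rope.py | numbers_letters
-- ===== SOURCE A (Python) =====
-- def numbers_letters(a):
--     numbers = []
--     letters = []
--     for i in a:
--         if i.isdigit():
--             numbers += [i]
--         else:
--             letters += [i]
--     return numbers, letters
-- ===== SOURCE B (Python) =====
-- def numbers_letters(a):
--     s = sorted(a, key=lambda i: 0 if i.isdigit() else 1)
--     k = sum(1 for x in s if x.isdigit())
--     return s[:k], s[k:]
-- ===== Notes on version B (the rewrite author's own statement) =====
-- stated objective: alternative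
-- what changed: Replaces A's single append loop into two accumulators with a stable sort by an is-digit key (digits first) followed by splitting the sorted list at the digit count; stability of sorted preserves A's relative order within each group.
import Mathlib
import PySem

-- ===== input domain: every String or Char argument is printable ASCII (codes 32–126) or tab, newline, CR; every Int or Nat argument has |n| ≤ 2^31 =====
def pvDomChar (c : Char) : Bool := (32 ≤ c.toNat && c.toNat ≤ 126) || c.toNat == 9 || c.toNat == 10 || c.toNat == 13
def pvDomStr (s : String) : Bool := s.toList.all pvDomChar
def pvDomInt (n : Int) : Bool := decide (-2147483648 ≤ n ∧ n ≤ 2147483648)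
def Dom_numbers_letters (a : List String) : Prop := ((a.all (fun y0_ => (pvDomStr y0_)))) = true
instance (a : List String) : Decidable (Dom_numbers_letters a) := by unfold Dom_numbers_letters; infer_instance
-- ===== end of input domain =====

-- B replaces A's single append loop with a stable sort by an is-digit key and a split at the digit count (alternative algorithm; stability preserves the relative order).

-- ===== PORT A =====
def numbers_letters (a : List String) : List String × List String :=
  let st := a.foldl (fun (st : List String × List String) i =>
    if PySem.Str.strIsdigit i then (st.1 ++ [i], st.2) else (st.1, st.2 ++ [i])) ([], [])
  (st.1, st.2)

-- ===== PORT B =====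
def numbers_letters_alt (a : List String) : List String × List String :=
  let s := PySem.List.sorted a (fun i => if PySem.Str.strIsdigit i then (0 : Int) else 1)
  let k : Int := s.foldl (fun acc x => if PySem.Str.strIsdigit x then acc + 1 else acc) 0
  (PySem.List.slice s none (some k), PySem.List.slice s (some k) none)

-- ===== PRECONDITION & SPEC =====
def Spec_numbers_letters (a : List String) (out : List String × List String) : Prop := out = numbers_letters_alt a
instance (a : List String) (out : List String × List String) : Decidable (Spec_numbers_letters a out) := by unfold Spec_numbers_letters; infer_instance

-- ===== CLAIM (what is proved, stated in full; the proofs are below) =====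
def Claim_equal_numbers_letters : Prop := ∀ (a : List String), Dom_numbers_letters a → Spec_numbers_letters a (numbers_letters a)

-- ===== LEMMAS AND PROOFS =====

-- A's fold accumulates exactly the two filters.
theorem numbers_letters_fold_A (a : List String) (n l : List String) :
    a.foldl (fun (st : List String × List String) i =>
      if PySem.Str.strIsdigit i then (st.1 ++ [i], st.2) else (st.1, st.2 ++ [i])) (n, l)
    = (n ++ a.filter (fun i => PySem.Str.strIsdigit i),
       l ++ a.filter (fun i => !PySem.Str.strIsdigit i)) := by
  induction a generalizing n l with
  | nil => simp
  | cons x xs ih =>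
    rw [List.foldl_cons]
    by_cases h : PySem.Str.strIsdigit x = true
    · rw [if_pos h, ih]
      simp only [List.filter_cons, h, if_true, Bool.not_true, Bool.false_eq_true, if_false]
      simp
    · have h' : PySem.Str.strIsdigit x = false := by simpa using h
      rw [if_neg h, ih]
      simp only [List.filter_cons, h', Bool.false_eq_true, if_false, Bool.not_false, if_true]
      simp

-- insertBy places x at the very end when 'before x' never holds.
theorem insertBy_end {α : Type} (before : α → α → Bool) (x : α) (ys : List α)
    (h : ∀ y ∈ ys, before x y = false) :
    PySem.List.insertBy before x ys = ys ++ [x] := by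
  induction ys with
  | nil => rfl
  | cons y ys ih =>
    simp only [PySem.List.insertBy]
    rw [h y (by simp)]
    simp only [Bool.false_eq_true, if_false, List.cons_append, List.cons.injEq, true_and]
    exact ih (fun z hz => h z (by simp [hz]))

-- insertBy places x right after the block n when 'before x' fails on all of n and holds on y.
theorem insertBy_mid {α : Type} (before : α → α → Bool) (x : α) (n : List α) (y : α) (l : List α)
    (hn : ∀ z ∈ n, before x z = false) (hy : before x y = true) :
    PySem.List.insertBy before x (n ++ y :: l) = n ++ x :: y :: l := by
  induction n with
  | nil => simp only [List.nil_append, PySem.List.insertBy, hy, if_true]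
  | cons z n ih =>
    simp only [List.cons_append, PySem.List.insertBy]
    rw [hn z (by simp)]
    simp only [Bool.false_eq_true, if_false, List.cons.injEq, true_and]
    exact ih (fun w hw => hn w (by simp [hw]))

-- the insertion-sort fold with the 0/1 is-digit key builds (digits so far) ++ (non-digits so far).
theorem fold_insertBy_partition (a : List String) (n l : List String)
    (hn : ∀ z ∈ n, PySem.Str.strIsdigit z = true)
    (hl : ∀ z ∈ l, PySem.Str.strIsdigit z = false) :
    a.foldl (fun acc x => PySem.List.insertBy
        (fun p q => decide ((if PySem.Str.strIsdigit p then (0 : Int) else 1)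
                          < (if PySem.Str.strIsdigit q then (0 : Int) else 1))) x acc) (n ++ l)
    = (n ++ a.filter (fun i => PySem.Str.strIsdigit i))
      ++ (l ++ a.filter (fun i => !PySem.Str.strIsdigit i)) := by
  induction a generalizing n l with
  | nil => simp
  | cons x xs ih =>
    rw [List.foldl_cons]
    by_cases h : PySem.Str.strIsdigit x = true
    · have hstep : PySem.List.insertBy
          (fun p q => decide ((if PySem.Str.strIsdigit p then (0 : Int) else 1)
                            < (if PySem.Str.strIsdigit q then (0 : Int) else 1))) x (n ++ l)
          = (n ++ [x]) ++ l := by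
        cases l with
        | nil =>
          rw [List.append_nil, insertBy_end _ _ _ (fun z hz => by simp only [h, hn z hz]; decide)]
          simp
        | cons y l =>
          rw [insertBy_mid _ _ _ _ _ (fun z hz => by simp only [h, hn z hz]; decide)
              (by simp only [h, hl y (by simp : y ∈ y :: l)]; decide)]
          simp
      have hn' : ∀ z ∈ n ++ [x], PySem.Str.strIsdigit z = true := by
        intro z hz
        rcases List.mem_append.1 hz with hz | hz
        · exact hn z hz
        · rw [List.mem_singleton.1 hz]; exact h
      rw [hstep, ih (n ++ [x]) l hn' hl]
      simp only [List.filter_cons, h, if_true, Bool.not_true, Bool.false_eq_true, if_false]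
      simp
    · have h' : PySem.Str.strIsdigit x = false := by simpa using h
      have hstep : PySem.List.insertBy
          (fun p q => decide ((if PySem.Str.strIsdigit p then (0 : Int) else 1)
                            < (if PySem.Str.strIsdigit q then (0 : Int) else 1))) x (n ++ l)
          = n ++ (l ++ [x]) := by
        rw [insertBy_end _ _ _ (fun z hz => by
          rcases List.mem_append.1 hz with hz | hz
          · simp only [h', hn z hz]; decide
          · simp only [h', hl z hz]; decide)]
        simp
      have hl' : ∀ z ∈ l ++ [x], PySem.Str.strIsdigit z = false := by
        intro z hz
        rcases List.mem_append.1 hz with hz | hz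
        · exact hl z hz
        · rw [List.mem_singleton.1 hz]; exact h'
      rw [hstep, ih n (l ++ [x]) hn hl']
      simp only [List.filter_cons, h', Bool.false_eq_true, if_false, Bool.not_false, if_true]
      simp
-- sorted with the binary key is the stable partition.
theorem sorted_partition (a : List String) :
    PySem.List.sorted a (fun i => if PySem.Str.strIsdigit i then (0 : Int) else 1)
    = a.filter (fun i => PySem.Str.strIsdigit i) ++ a.filter (fun i => !PySem.Str.strIsdigit i) := by
  rw [PySem.List.sorted_eq_foldl_insertBy]
  simpa using fold_insertBy_partition a [] [] (by simp) (by simp)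

-- the counting fold equals the length of the digit filter, as an Int.
theorem count_fold (s : List String) (c : Int) :
    s.foldl (fun acc x => if PySem.Str.strIsdigit x then acc + 1 else acc) c
    = c + ((s.filter (fun i => PySem.Str.strIsdigit i)).length : Int) := by
  induction s generalizing c with
  | nil => simp
  | cons x xs ih =>
    rw [List.foldl_cons]
    by_cases h : PySem.Str.strIsdigit x = true
    · rw [if_pos h, ih]
      simp only [List.filter_cons, h, if_true, List.length_cons]
      push_cast; ring
    · have h' : PySem.Str.strIsdigit x = false := by simpa using h
      rw [if_neg h, ih]
      simp only [List.filter_cons, h', Bool.false_eq_true, if_false]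

-- ===== VERDICT (by name: the statement is the Claim_ definition above) =====
theorem numbers_letters_spec : Claim_equal_numbers_letters := by
  intro a _
  show numbers_letters a = numbers_letters_alt a
  unfold numbers_letters numbers_letters_alt
  rw [numbers_letters_fold_A a [] []]
  simp only [List.nil_append, sorted_partition a, count_fold _ 0, zero_add]
  have hfilt : (a.filter (fun i => PySem.Str.strIsdigit i)
      ++ a.filter (fun i => !PySem.Str.strIsdigit i)).filter (fun i => PySem.Str.strIsdigit i)
      = a.filter (fun i => PySem.Str.strIsdigit i) := by
    rw [List.filter_append]
    have h1 : (a.filter (fun i => PySem.Str.strIsdigit i)).filter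
        (fun i => PySem.Str.strIsdigit i) = a.filter (fun i => PySem.Str.strIsdigit i) :=
      List.filter_eq_self.2 (fun x hx => (List.mem_filter.1 hx).2)
    have h2 : (a.filter (fun i => !PySem.Str.strIsdigit i)).filter
        (fun i => PySem.Str.strIsdigit i) = [] :=
      List.filter_eq_nil_iff.2 (fun x hx => by
        have := (List.mem_filter.1 hx).2
        simp at this
        simp [this])
    rw [h1, h2, List.append_nil]
  rw [hfilt, PySem.List.slice_to_natCast, PySem.List.slice_from_natCast,
      List.take_left' rfl, List.drop_left' rfl]
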